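-- pv_equiv track=rewrite | github.com/mozilla-ai/cq | scripts/install/src/cq_install/opencode_commands.py | transform_command
-- ===== SOURCE A (Python) =====
-- def transform_command(source: str) -> str:
--     """Return the OpenCode-flavored version of a Claude Code command file."""
--     lines = source.splitlines(keepends=True)
--     if not lines or lines[0].rstrip("\n") != "---":
--         return source
--
--     out: list[str] = [lines[0]]
--     in_frontmatter = True
--     closed = False
--     for line in lines[1:]:
--         if in_frontmatter and line.rstrip("\n") == "---":
--             out.append("agent: build\n")
--             out.append(line)
--             in_frontmatter = False
--             closed = True
--             continue
--         if in_frontmatter and line.startswith("name:"):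
--             continue
--         out.append(line)
--
--     if not closed:
--         return source
--     return "".join(out)
-- ===== SOURCE B (Python) =====
-- def transform_command(source: str) -> str:
--     """Return the OpenCode-flavored version of a Claude Code command file."""
--     lines = source.splitlines(keepends=True)
--     if not lines or lines[0].rstrip("\n") != "---":
--         return source
--     close = next((i for i, line in enumerate(lines[1:], 1)
--                   if line.rstrip("\n") == "---"), None)
--     if close is None:
--         return source
--     frontmatter = [line for line in lines[1:close] if not line.startswith("name:")]
--     return "".join([lines[0], *frontmatter, "agent: build\n", *lines[close:]])
-- ===== Notes on version B (the rewrite author's own statement) =====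
-- stated objective: simpler
-- what changed: Replaces the in_frontmatter/closed flag machinery with an explicit search for the index of the closing delimiter line, then assembles the output from list slices (header + name-filtered frontmatter + agent line + untouched remainder).
import Mathlib
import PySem

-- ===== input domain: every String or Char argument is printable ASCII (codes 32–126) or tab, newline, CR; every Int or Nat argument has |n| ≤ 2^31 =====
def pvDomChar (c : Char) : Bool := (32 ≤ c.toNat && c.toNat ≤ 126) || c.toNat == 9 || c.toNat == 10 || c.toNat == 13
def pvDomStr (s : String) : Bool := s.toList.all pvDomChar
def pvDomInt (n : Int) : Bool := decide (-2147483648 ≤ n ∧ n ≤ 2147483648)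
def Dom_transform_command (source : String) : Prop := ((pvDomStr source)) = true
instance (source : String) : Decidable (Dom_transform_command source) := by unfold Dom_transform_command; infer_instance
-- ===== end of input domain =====

-- B replaces A's in_frontmatter/closed flag loop with an explicit search for the closing
-- delimiter line plus slice-based assembly (objective: simpler).

-- shared helper: Python's str.splitlines(keepends=True); exact on the Dom alphabet
-- (printable ASCII + tab/newline/CR), where the only line breaks are '\n', '\r', '\r\n'.
def pySplitKeepends (cur : List Char) : List Char → List (List Char)
  | [] => if cur.isEmpty then [] else [cur.reverse]
  | c :: rest =>
    if c = '\n' then (cur.reverse ++ ['\n']) :: pySplitKeepends [] rest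
    else if c = '\r' then
      match rest with
      | '\n' :: rest' => (cur.reverse ++ ['\r', '\n']) :: pySplitKeepends [] rest'
      | [] => [cur.reverse ++ ['\r']]
      | c2 :: rest' => (cur.reverse ++ ['\r']) :: pySplitKeepends [] (c2 :: rest')
    else pySplitKeepends (c :: cur) rest
  termination_by l => l.length
  decreasing_by all_goals simp <;> omega

-- shared helper: Python's line.rstrip("\n") (strip trailing '\n' characters only)
def rstripNl (l : List Char) : List Char :=
  (l.reverse.dropWhile (fun c => c == '\n')).reverse

-- ===== PORT A =====
-- the body of A's for-loop (state = (out, in_frontmatter, closed))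
def stepA (acc : List (List Char) × Bool × Bool) (line : List Char) :
    List (List Char) × Bool × Bool :=
  let (out, in_fm, closed) := acc
  if in_fm && (rstripNl line == "---".toList) then
    (out ++ ["agent: build\n".toList, line], false, true)
  else if in_fm && PySem.Chars.startswith line "name:".toList then
    (out, in_fm, closed)
  else (out ++ [line], in_fm, closed)

def transform_command (source : String) : String :=
  let lines := pySplitKeepends [] source.toList
  match lines with
  | [] => source
  | l0 :: rest =>
    if rstripNl l0 = "---".toList then
      let res := rest.foldl stepA ([l0], true, false)
      if res.2.2 then String.ofList (PySem.Chars.join [] res.1) else source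
    else source

-- ===== PORT B =====
def transform_command_alt (source : String) : String :=
  let lines := pySplitKeepends [] source.toList
  match lines with
  | [] => source
  | l0 :: rest =>
    if rstripNl l0 = "---".toList then
      match rest.findIdx? (fun l => rstripNl l == "---".toList) with
      | none => source
      | some i =>
        String.ofList (PySem.Chars.join []
          (l0 :: ((rest.take i).filter (fun l => !PySem.Chars.startswith l "name:".toList)
            ++ ("agent: build\n".toList :: rest.drop i))))
    else source

-- ===== PRECONDITION & SPEC =====
def Spec_transform_command (source : String) (out : String) : Prop := out = transform_command_alt source
instance (source : String) (out : String) : Decidable (Spec_transform_command source out) := by unfold Spec_transform_command; infer_instance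

-- ===== CLAIM (what is proved, stated in full; the proofs are below) =====
def Claim_equal_transform_command : Prop := ∀ (source : String), Dom_transform_command source → Spec_transform_command source (transform_command source)

-- ===== LEMMAS AND PROOFS =====

-- after the frontmatter is closed, A's loop appends every line verbatim
theorem loopA_closed (ls : List (List Char)) (out : List (List Char)) :
    ls.foldl stepA (out, false, true) = (out ++ ls, false, true) := by
  induction ls generalizing out with
  | nil => simp
  | cons l ls ih => simp [stepA, ih]

-- inside the frontmatter, A's loop computes B's find-the-delimiter / filter / splice
theorem loopA_open (ls : List (List Char)) (out : List (List Char)) :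
    ls.foldl stepA (out, true, false) =
      match ls.findIdx? (fun l => rstripNl l == "---".toList) with
      | none =>
          (out ++ ls.filter (fun l => !PySem.Chars.startswith l "name:".toList), true, false)
      | some i =>
          (out ++ ((ls.take i).filter (fun l => !PySem.Chars.startswith l "name:".toList)
            ++ ("agent: build\n".toList :: ls.drop i)), false, true) := by
  induction ls generalizing out with
  | nil => simp
  | cons l ls ih =>
    rw [List.foldl_cons, List.findIdx?_cons]
    by_cases hp : rstripNl l = ['-', '-', '-']
    · have hstep : stepA (out, true, false) l =
          (out ++ ["agent: build\n".toList, l], false, true) := by simp [stepA, hp]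
      rw [hstep, loopA_closed]
      simp [hp]
    · by_cases hn : PySem.Chars.startswith l ['n', 'a', 'm', 'e', ':'] = true
      · have hstep : stepA (out, true, false) l = (out, true, false) := by
          simp [stepA, hp, hn]
        rw [hstep, ih]
        cases h : ls.findIdx? (fun l => rstripNl l == "---".toList) <;>
          simp [hp, hn, List.filter_cons]
      · have hstep : stepA (out, true, false) l = (out ++ [l], true, false) := by
          simp [stepA, hp, hn]
        rw [hstep, ih]
        cases h : ls.findIdx? (fun l => rstripNl l == "---".toList) <;>
          simp [hp, hn, List.filter_cons]

-- ===== VERDICT (by name: the statement is the Claim_ definition above) =====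
theorem transform_command_spec : Claim_equal_transform_command := by
  intro source _
  unfold Spec_transform_command transform_command transform_command_alt
  cases h : pySplitKeepends [] source.toList with
  | nil => simp
  | cons l0 rest =>
    simp only
    by_cases h0 : rstripNl l0 = "---".toList
    · rw [if_pos h0, if_pos h0, loopA_open]
      cases hidx : rest.findIdx? (fun l => rstripNl l == "---".toList) <;> simp
    · rw [if_neg h0, if_neg h0]
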